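-- pv_equiv track=rewrite | github.com/larrilbp25/registro-uneal | trunk/src/registro/utils.py | is_numeric_digit
-- ===== SOURCE A (Python) =====
-- def is_numeric_digit(digito):
--     try:
--         for inteiro in range(10):
--             if int(digito) == inteiro:
--                 return True
--         return False
--     except ValueError:
--         return False
-- ===== SOURCE B (Python) =====
-- def is_numeric_digit(digito):
--     try:
--         return 0 <= int(digito) <= 9
--     except ValueError:
--         return False
-- ===== Notes on version B (the rewrite author's own statement) =====
-- stated objective: simpler
-- what changed: Replaces the explicit loop over range(10) with equality tests by a single closed-form bounds check 0 <= int(digito) <= 9.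
import Mathlib
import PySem

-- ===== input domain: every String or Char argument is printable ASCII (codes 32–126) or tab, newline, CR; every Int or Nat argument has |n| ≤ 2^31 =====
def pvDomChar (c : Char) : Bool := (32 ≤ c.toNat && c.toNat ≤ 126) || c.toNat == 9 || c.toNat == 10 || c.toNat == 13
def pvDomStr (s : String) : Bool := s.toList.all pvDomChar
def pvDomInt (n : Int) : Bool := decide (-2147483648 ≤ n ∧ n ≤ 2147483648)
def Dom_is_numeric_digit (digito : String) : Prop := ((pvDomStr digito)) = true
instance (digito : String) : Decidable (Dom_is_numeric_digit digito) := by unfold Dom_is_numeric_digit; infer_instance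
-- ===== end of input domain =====

-- ===== PORT A =====
-- loop 'for inteiro in range(10): if int(digito)==inteiro: return True' with early return
def pvLoopA (n : Int) : List Int → Bool
  | [] => false
  | i :: rest => if n == i then true else pvLoopA n rest

def is_numeric_digit (digito : String) : Bool :=
  match PySem.Int.ofStr? digito with
  | none => false            -- except ValueError: return False
  | some n => pvLoopA n (PySem.List.pyRange 0 10 1)

-- ===== PORT B =====
-- B: closed-form bounds check 0 <= int(digito) <= 9 inside the same try/except
def is_numeric_digit_alt (digito : String) : Bool :=
  match PySem.Int.ofStr? digito with
  | none => false
  | some n => decide (0 ≤ n ∧ n ≤ 9)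

-- ===== PRECONDITION & SPEC =====
def Spec_is_numeric_digit (digito : String) (out : Bool) : Prop := out = is_numeric_digit_alt digito
instance (digito : String) (out : Bool) : Decidable (Spec_is_numeric_digit digito out) := by unfold Spec_is_numeric_digit; infer_instance

-- ===== CLAIM (what is proved, stated in full; the proofs are below) =====
def Claim_equal_is_numeric_digit : Prop := ∀ (digito : String), Dom_is_numeric_digit digito → Spec_is_numeric_digit digito (is_numeric_digit digito)

-- ===== LEMMAS AND PROOFS =====

-- ===== VERDICT (by name: the statement is the Claim_ definition above) =====
theorem pvLoopA_range (n : Int) : pvLoopA n (PySem.List.pyRange 0 10 1) = decide (0 ≤ n ∧ n ≤ 9) := by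
  have h : PySem.List.pyRange 0 10 1 = [0,1,2,3,4,5,6,7,8,9] := by decide
  rw [h]
  simp only [pvLoopA]
  by_cases h0 : (0:Int) ≤ n ∧ n ≤ 9
  · obtain ⟨h1, h2⟩ := h0
    interval_cases n <;> decide
  · have : ∀ i : Int, 0 ≤ i → i ≤ 9 → n ≠ i := by
      intro i h1 h2 he; exact h0 ⟨he ▸ h1, he ▸ h2⟩
    simp only [beq_iff_eq]
    rw [if_neg (this 0 (by norm_num) (by norm_num)), if_neg (this 1 (by norm_num) (by norm_num)),
        if_neg (this 2 (by norm_num) (by norm_num)), if_neg (this 3 (by norm_num) (by norm_num)),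
        if_neg (this 4 (by norm_num) (by norm_num)), if_neg (this 5 (by norm_num) (by norm_num)),
        if_neg (this 6 (by norm_num) (by norm_num)), if_neg (this 7 (by norm_num) (by norm_num)),
        if_neg (this 8 (by norm_num) (by norm_num)), if_neg (this 9 (by norm_num) (by norm_num))]
    simp [h0]

theorem is_numeric_digit_spec : Claim_equal_is_numeric_digit := by
  intro digito _
  unfold Spec_is_numeric_digit is_numeric_digit is_numeric_digit_alt
  cases PySem.Int.ofStr? digito with
  | none => rfl
  | some n => exact pvLoopA_range n
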